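-- pv_equiv track=rewrite | github.com/Artemigos/advent-of-code | python/2015/11/solution.py | pass_iterator
-- ===== SOURCE A (Python) =====
-- data = 'vzbxkghb'
--
-- def pass_iterator(start=data):
--     ord_a = ord('a')
--     ord_z = ord('z')
--     letters = list(map(ord, start))
--     def add_to_digit(i):
--         if i < 0 :
--             return False
--         letters[i] += 1
--         if letters[i] > ord_z:
--             letters[i] = ord_a
--             return add_to_digit(i-1)
--         return True
--     while add_to_digit(len(letters)-1):
--         decoded = list(map(chr, letters))
--         yield ''.join(decoded)
-- ===== SOURCE B (Python) =====
-- data = 'vzbxkghb'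
--
-- def pass_iterator(start=data):
--     # successor by locating the rightmost non-carrying character and rebuilding
--     # the string with slices, instead of A's recursive per-digit carry on an ord list
--     s = start
--     while True:
--         r = s[::-1]
--         t = 0
--         while t < len(r) and ord(r[t]) >= 122:
--             t += 1
--         if t == len(s):
--             return
--         i = len(s) - 1 - t
--         s = s[:i] + chr(ord(s[i]) + 1) + 'a' * t
--         yield s
-- ===== Notes on version B (the rewrite author's own statement) =====
-- stated objective: alternative
-- what changed: B computes each successor by scanning the reversed string for the rightmost non-carrying character and rebuilding the password with slices (prefix + incremented char + 'a'*t), instead of A's recursive add_to_digit carry that mutates an ord list digit by digit.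
import Mathlib
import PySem

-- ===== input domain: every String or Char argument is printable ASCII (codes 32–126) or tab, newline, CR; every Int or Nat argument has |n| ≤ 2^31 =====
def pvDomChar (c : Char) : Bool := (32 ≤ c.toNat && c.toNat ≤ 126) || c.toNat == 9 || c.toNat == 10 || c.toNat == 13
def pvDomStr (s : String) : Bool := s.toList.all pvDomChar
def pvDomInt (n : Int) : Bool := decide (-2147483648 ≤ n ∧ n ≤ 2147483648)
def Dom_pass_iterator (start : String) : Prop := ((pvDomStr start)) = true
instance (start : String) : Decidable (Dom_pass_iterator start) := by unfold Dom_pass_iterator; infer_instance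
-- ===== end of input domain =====

-- B rebuilds each successor with a slice at the rightmost non-carrying character instead of
-- A's recursive per-digit carry over a mutable ord list (objective: alternative decomposition).

-- Termination measure machinery (cited by the ports' `decreasing_by`): a positional
-- weight sum that strictly decreases at every successful password step.
def pvW (d : Int) : Nat := (1999999 - d).toNat

def pvWc (c : Char) : Nat := 1999999 - c.toNat

def pvN {α : Type} (w : α → Nat) (xs : List α) : Nat :=
  xs.foldl (fun a x => a * 2000000 + w x) 0

theorem pvN_fold {α : Type} (w : α → Nat) (xs : List α) (a : Nat) :
    xs.foldl (fun a x => a * 2000000 + w x) a = a * 2000000 ^ xs.length + pvN w xs := by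
  induction xs generalizing a with
  | nil => simp [pvN]
  | cons x xs ih =>
      simp only [List.foldl_cons, List.length_cons, pvN] at *
      rw [ih, ih (0 * 2000000 + w x)]
      ring

theorem pvN_append {α : Type} (w : α → Nat) (xs ys : List α) :
    pvN w (xs ++ ys) = pvN w xs * 2000000 ^ ys.length + pvN w ys := by
  simp only [pvN, List.foldl_append]
  rw [pvN_fold]
  rfl

theorem pvN_cons {α : Type} (w : α → Nat) (x : α) (xs : List α) :
    pvN w (x :: xs) = w x * 2000000 ^ xs.length + pvN w xs := by
  have := pvN_append w [x] xs
  simpa [pvN] using this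

theorem pvN_lt_pow {α : Type} (w : α → Nat) (xs : List α)
    (h : ∀ x ∈ xs, w x < 2000000) : pvN w xs < 2000000 ^ xs.length := by
  induction xs with
  | nil => simp [pvN]
  | cons x xs ih =>
      have hx := h x (by simp)
      have hxs := ih (fun y hy => h y (List.mem_cons_of_mem _ hy))
      rw [pvN_cons, List.length_cons]
      calc w x * 2000000 ^ xs.length + pvN w xs
          < w x * 2000000 ^ xs.length + 2000000 ^ xs.length := by omega
        _ = (w x + 1) * 2000000 ^ xs.length := by ring
        _ ≤ 2000000 * 2000000 ^ xs.length := by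
            exact Nat.mul_le_mul_right _ (by omega)
        _ = 2000000 ^ (xs.length + 1) := by ring

-- ===== PORT A =====
-- A's inner recursion add_to_digit(i): the second argument is i+1 (0 encodes i = -1,
-- where Python returns False ⇒ none); letters[i] += 1 then wrap/carry, as in A.
def addToDigit : List Int → Nat → Option (List Int)
  | _, 0 => none
  | xs, k + 1 =>
      let v := xs.getD k 0 + 1
      if v > 122 then addToDigit (xs.set k 97) k
      else some (xs.set k v)

theorem addToDigit_decr : ∀ (k : Nat) (xs l' : List Int), k ≤ xs.length →
    addToDigit xs k = some l' →
    l'.length = xs.length ∧ l'.drop k = xs.drop k ∧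
      pvN pvW (l'.take k) < pvN pvW (xs.take k) := by
  intro k
  induction k with
  | zero => intro xs l' _ h; simp [addToDigit] at h
  | succ k ih =>
      intro xs l' hk h
      have hklen : k < xs.length := by omega
      simp only [addToDigit] at h
      by_cases hv : xs.getD k 0 + 1 > 122
      · rw [if_pos hv] at h
        obtain ⟨hlen, hdrop, hlt⟩ := ih (xs.set k 97) l' (by simp; omega) h
        have hsetlen : (xs.set k 97).length = xs.length := by simp
        have hdropset : (xs.set k 97).drop k = (97 : Int) :: xs.drop (k + 1) := by
          rw [List.drop_eq_getElem_cons (by simpa using hklen)]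
          rw [List.drop_set]
          simp
        have hdk : l'.drop k = (97 : Int) :: xs.drop (k + 1) := hdrop.trans hdropset
        have hld : l'.drop (k + 1) = xs.drop (k + 1) := by
          rw [← List.tail_drop, hdk]; rfl
        have hkl' : k < l'.length := by omega
        have hget : l'[k]'hkl' = 97 := by
          have h1 : (l'.drop k).head? = some (l'[k]'hkl') := by
            simp [List.head?_drop, List.getElem?_eq_getElem hkl']
          rw [hdk] at h1
          simpa using h1.symm
        have htakeset : (xs.set k 97).take k = xs.take k := by
          rw [List.take_set]
          exact List.set_eq_of_length_le (by simp)
        rw [htakeset] at hlt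
        refine ⟨by omega, hld, ?_⟩
        have h2 : l'.take (k + 1) = l'.take k ++ [(97 : Int)] := by
          rw [List.take_add_one]
          simp [List.getElem?_eq_getElem hkl', hget]
        have h3 : xs.take (k + 1) = xs.take k ++ [xs[k]'hklen] := by
          rw [List.take_add_one]
          simp [List.getElem?_eq_getElem hklen]
        rw [h2, h3, pvN_append, pvN_append]
        have h97 : pvN pvW [(97 : Int)] = 1999902 := by decide
        have hw : pvN pvW [xs[k]'hklen] = pvW (xs[k]'hklen) := by
          simp [pvN, pvW]
        rw [h97, hw]
        simp only [List.length_cons, List.length_nil]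
        omega
      · rw [if_neg hv] at h
        have hl' : l' = xs.set k (xs.getD k 0 + 1) :=
          ((Option.some.injEq _ _).mp h).symm
        subst hl'
        have hgd : xs.getD k 0 = xs[k]'hklen := List.getD_eq_getElem xs 0 hklen
        refine ⟨by simp, ?_, ?_⟩
        · rw [List.drop_set]; simp [Nat.lt_succ_of_le (le_refl k)]
        · have h2 : (xs.set k (xs.getD k 0 + 1)).take (k + 1)
              = xs.take k ++ [xs[k]'hklen + 1] := by
            rw [List.take_add_one, List.take_set, List.set_eq_of_length_le (by simp)]
            simp [hklen]
          have h3 : xs.take (k + 1) = xs.take k ++ [xs[k]'hklen] := by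
            rw [List.take_add_one]
            simp [List.getElem?_eq_getElem hklen]
          rw [h2, h3, pvN_append, pvN_append]
          have hle : xs[k]'hklen + 1 ≤ 122 := by rw [hgd] at hv; omega
          have hwlt : pvN pvW [xs[k]'hklen + 1] < pvN pvW [xs[k]'hklen] := by
            simp only [pvN, List.foldl_cons, List.foldl_nil, pvW]
            omega
          simp only [List.length_cons, List.length_nil]
          omega

theorem addToDigit_measure (xs l' : List Int) (h : addToDigit xs xs.length = some l') :
    pvN pvW l' < pvN pvW xs := by
  obtain ⟨hlen, _, hlt⟩ := addToDigit_decr xs.length xs l' (le_refl _) h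
  simpa [List.take_of_length_le, hlen.le, hlen] using hlt

-- A's outer while-loop: each successful add_to_digit yields ''.join(map(chr, letters)).
-- chr(d) is ported as Char.ofNat d.toNat — exact here since every stored digit is a
-- valid nonnegative code point (original ords, or 97 / an incremented value ≤ 122).
def loopA (xs : List Int) : List String :=
  match h : addToDigit xs xs.length with
  | none => []
  | some l' => String.mk (l'.map (fun d => Char.ofNat d.toNat)) :: loopA l'
termination_by pvN pvW xs
decreasing_by exact addToDigit_measure _ _ h

def pass_iterator (start : String) : List String :=
  loopA (start.toList.map (fun c => (c.toNat : Int)))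

-- ===== PORT B =====
-- Source B's inner while loop counting leading carry characters of the reversed string
def countCarry : List Char → Nat
  | [] => 0
  | c :: cs => if 122 ≤ c.toNat then countCarry cs + 1 else 0

theorem countCarry_le (xs : List Char) : countCarry xs ≤ xs.length := by
  induction xs with
  | nil => simp [countCarry]
  | cons c cs ih => simp only [countCarry, List.length_cons]; split <;> omega

theorem countCarry_getD (xs : List Char) (h : countCarry xs < xs.length) :
    (xs.getD (countCarry xs) 'a').toNat < 122 := by
  induction xs with
  | nil => simp at h
  | cons c cs ih =>
      by_cases hc : 122 ≤ c.toNat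
      · simp only [countCarry, if_pos hc] at h ⊢
        exact ih (by simpa using h)
      · simp only [countCarry, if_neg hc]
        simp; omega

-- one step of Source B: s[:i] + chr(ord(s[i]) + 1) + 'a' * t ; the index i is always in
-- range (t < len s in this branch), so s[i] is ported as getD with an unused default.
def bStep (s : List Char) : Option (List Char) :=
  let t := countCarry s.reverse
  if t = s.length then none
  else
    let i := s.length - 1 - t
    some (s.take i ++ [Char.ofNat ((s.getD i 'a').toNat + 1)] ++ List.replicate t 'a')

theorem pv_toNat_ofNat (n : Nat) (h : n < 55296) : (Char.ofNat n).toNat = n := by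
  have hv : n.isValidChar := Or.inl h
  simp [Char.ofNat, Char.ofNatAux, hv, Char.toNat]

theorem bStep_measure (s s' : List Char) (h : bStep s = some s') :
    pvN pvWc s' < pvN pvWc s := by
  simp only [bStep] at h
  set t := countCarry s.reverse with ht
  by_cases h0 : t = s.length
  · simp [h0] at h
  · rw [if_neg h0] at h
    have htle : t ≤ s.length := by simpa using countCarry_le s.reverse
    have htlt : t < s.length := by omega
    set i := s.length - 1 - t with hi
    have hilen : i < s.length := by omega
    have hgd : s.getD i 'a' = s[i]'hilen := List.getD_eq_getElem s 'a' hilen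
    have hclt : (s[i]'hilen).toNat < 122 := by
      have hrl : t < s.reverse.length := by simpa using htlt
      have := countCarry_getD s.reverse (by simpa using htlt)
      rw [List.getD_eq_getElem s.reverse 'a' hrl] at this
      rw [List.getElem_reverse] at this
      simpa [← hi, List.length_reverse] using this
    have hs' : s' = s.take i ++ [Char.ofNat ((s[i]'hilen).toNat + 1)] ++ List.replicate t 'a' := by
      rw [← hgd]; exact ((Option.some.injEq _ _).mp h.symm)
    have hdecomp : s = s.take i ++ ([s[i]'hilen] ++ s.drop (i + 1)) := by
      conv_lhs => rw [← List.take_append_drop i s]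
      rw [List.drop_eq_getElem_cons hilen]
      simp
    have hdlen : (s.drop (i + 1)).length = t := by simp; omega
    have hton : (Char.ofNat ((s[i]'hilen).toNat + 1)).toNat = (s[i]'hilen).toNat + 1 :=
      pv_toNat_ofNat _ (by omega)
    rw [hs']
    conv_rhs => rw [hdecomp]
    rw [List.append_assoc,
      pvN_append pvWc (s.take i) ([Char.ofNat ((s[i]'hilen).toNat + 1)] ++ List.replicate t 'a'),
      pvN_append pvWc (s.take i) ([s[i]'hilen] ++ s.drop (i + 1))]
    have hlen1 : ([Char.ofNat ((s[i]'hilen).toNat + 1)] ++ List.replicate t 'a').length = t + 1 := by simp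
    have hlen2 : ([s[i]'hilen] ++ s.drop (i + 1)).length = t + 1 := by simp; omega
    rw [hlen1, hlen2]
    have hkey : pvN pvWc ([Char.ofNat ((s[i]'hilen).toNat + 1)] ++ List.replicate t 'a')
        < pvN pvWc ([s[i]'hilen] ++ s.drop (i + 1)) := by
      rw [List.singleton_append, List.singleton_append, pvN_cons, pvN_cons]
      rw [List.length_replicate, hdlen]
      have hrep : pvN pvWc (List.replicate t 'a') < 2000000 ^ t := by
        have := pvN_lt_pow pvWc (List.replicate t 'a') (by
          intro x hx
          rw [List.eq_of_mem_replicate hx]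
          simp [pvWc])
        simpa using this
      have hw' : pvWc (Char.ofNat ((s[i]'hilen).toNat + 1)) + 1 = pvWc (s[i]'hilen) := by
        simp only [pvWc, hton]; omega
      have hwpos : 1 ≤ pvWc (s[i]'hilen) := by simp only [pvWc]; omega
      calc pvWc (Char.ofNat ((s[i]'hilen).toNat + 1)) * 2000000 ^ t + pvN pvWc (List.replicate t 'a')
          < pvWc (Char.ofNat ((s[i]'hilen).toNat + 1)) * 2000000 ^ t + 2000000 ^ t :=
            Nat.add_lt_add_left hrep _
        _ = (pvWc (Char.ofNat ((s[i]'hilen).toNat + 1)) + 1) * 2000000 ^ t := by ring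
        _ = pvWc (s[i]'hilen) * 2000000 ^ t := by rw [hw']
        _ ≤ pvWc (s[i]'hilen) * 2000000 ^ t + pvN pvWc (s.drop (i + 1)) := Nat.le_add_right _ _
    exact Nat.add_lt_add_left hkey _

-- Source B's outer while True loop: step, stop on full carry, else yield the new string
def loopB (s : List Char) : List String :=
  match h : bStep s with
  | none => []
  | some s' => String.mk s' :: loopB s'
termination_by pvN pvWc s
decreasing_by exact bStep_measure _ _ h

def pass_iterator_alt (start : String) : List String :=
  loopB start.toList

-- ===== PRECONDITION & SPEC =====
def Spec_pass_iterator (start : String) (out : List String) : Prop := out = pass_iterator_alt start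
instance (start : String) (out : List String) : Decidable (Spec_pass_iterator start out) := by unfold Spec_pass_iterator; infer_instance

-- ===== CLAIM (what is proved, stated in full; the proofs are below) =====
def Claim_equal_pass_iterator : Prop := ∀ (start : String), Dom_pass_iterator start → Spec_pass_iterator start (pass_iterator start)

-- ===== LEMMAS AND PROOFS =====

def pvOrd (s : List Char) : List Int := s.map (fun c => (c.toNat : Int))

theorem ad_append : ∀ (k : Nat) (xs ys : List Int), k ≤ xs.length →
    addToDigit (xs ++ ys) k = (addToDigit xs k).map (· ++ ys) := by
  intro k
  induction k with
  | zero => intro xs ys _; simp [addToDigit]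
  | succ k ih =>
      intro xs ys hk
      have hklen : k < xs.length := by omega
      simp only [addToDigit]
      have hgd : (xs ++ ys).getD k 0 = xs.getD k 0 := by
        simp [List.getD_eq_getElem?_getD, List.getElem?_append_left hklen]
      rw [hgd]
      by_cases hv : xs.getD k 0 + 1 > 122
      · rw [if_pos hv, if_pos hv]
        rw [List.set_append_left _ _ hklen]
        exact ih (xs.set k 97) ys (by simp; omega)
      · rw [if_neg hv, if_neg hv]
        rw [List.set_append_left _ _ hklen]
        simp

theorem step_equiv (s : List Char) :
    addToDigit (pvOrd s) s.length = (bStep s).map pvOrd := by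
  induction s using List.reverseRecOn with
  | nil => simp [addToDigit, bStep, countCarry]
  | append_singleton s₀ c ih =>
      have hlen : (pvOrd s₀).length = s₀.length := by simp [pvOrd]
      have hOrd : pvOrd (s₀ ++ [c]) = pvOrd s₀ ++ [(c.toNat : Int)] := by simp [pvOrd]
      have hslen : (s₀ ++ [c]).length = s₀.length + 1 := by simp
      rw [hOrd, hslen]
      simp only [addToDigit]
      have hgd : (pvOrd s₀ ++ [(c.toNat : Int)]).getD s₀.length 0 = (c.toNat : Int) := by
        rw [← hlen, List.getD_eq_getElem?_getD]
        simp
      rw [hgd]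
      have hrev : (s₀ ++ [c]).reverse = c :: s₀.reverse := by simp
      by_cases hc : 122 ≤ c.toNat
      · have hv : (c.toNat : Int) + 1 > 122 := by exact_mod_cast by omega
        rw [if_pos hv]
        have hset : (pvOrd s₀ ++ [(c.toNat : Int)]).set s₀.length 97 = pvOrd s₀ ++ [(97 : Int)] := by
          rw [List.set_append_right _ _ (by omega)]
          simp [hlen]
        rw [hset]
        have hA := ad_append s₀.length (pvOrd s₀) [(97 : Int)] (by simp [pvOrd])
        rw [hA, ih]
        -- B side
        have hcc : countCarry ((s₀ ++ [c]).reverse) = countCarry s₀.reverse + 1 := by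
          rw [hrev]; simp [countCarry, hc]
        set t₀ := countCarry s₀.reverse with ht₀
        have ht₀le : t₀ ≤ s₀.length := by simpa using countCarry_le s₀.reverse
        by_cases h0 : t₀ = s₀.length
        · -- everything carries: both sides none
          have hB : bStep (s₀ ++ [c]) = none := by
            simp only [bStep, hcc, hslen]
            rw [if_pos (by omega)]
          have hB₀ : bStep s₀ = none := by
            simp only [bStep]
            rw [if_pos h0]
          rw [hB, hB₀]
          simp
        · have ht₀lt : t₀ < s₀.length := by omega
          have hB₀ : bStep s₀ = some (s₀.take (s₀.length - 1 - t₀)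
              ++ [Char.ofNat ((s₀.getD (s₀.length - 1 - t₀) 'a').toNat + 1)]
              ++ List.replicate t₀ 'a') := by
            simp only [bStep]
            rw [if_neg h0]
          have hieq : s₀.length + 1 - 1 - (t₀ + 1) = s₀.length - 1 - t₀ := by omega
          set i₀ := s₀.length - 1 - t₀ with hi₀
          have hi₀lt : i₀ < s₀.length := by omega
          have htk : (s₀ ++ [c]).take i₀ = s₀.take i₀ := by
            rw [List.take_append]
            simp [Nat.sub_eq_zero_of_le hi₀lt.le]
          have hgd2 : (s₀ ++ [c]).getD i₀ 'a' = s₀.getD i₀ 'a' := by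
            simp [List.getD_eq_getElem?_getD, List.getElem?_append_left hi₀lt]
          have hB : bStep (s₀ ++ [c]) = some (s₀.take i₀
              ++ [Char.ofNat ((s₀.getD i₀ 'a').toNat + 1)]
              ++ List.replicate (t₀ + 1) 'a') := by
            simp only [bStep, hcc, hslen]
            rw [if_neg (by omega), hieq, htk, hgd2]
          rw [hB, hB₀]
          simp only [Option.map_some]
          congr 1
          rw [List.replicate_succ']
          simp [pvOrd]
      · -- no carry at the last character
        have hv : ¬ ((c.toNat : Int) + 1 > 122) := by exact_mod_cast by omega
        rw [if_neg hv]
        have hset : (pvOrd s₀ ++ [(c.toNat : Int)]).set s₀.length ((c.toNat : Int) + 1)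
            = pvOrd s₀ ++ [(c.toNat : Int) + 1] := by
          rw [List.set_append_right _ _ (by omega)]
          simp [hlen]
        rw [hset]
        have hcc : countCarry ((s₀ ++ [c]).reverse) = 0 := by
          rw [hrev]; simp [countCarry, hc]
        have hB : bStep (s₀ ++ [c]) = some (s₀ ++ [Char.ofNat (c.toNat + 1)]) := by
          simp only [bStep, hcc, hslen]
          rw [if_neg (by omega)]
          congr 1
          have h1 : s₀.length + 1 - 1 - 0 = s₀.length := by omega
          rw [h1]
          have htk : (s₀ ++ [c]).take s₀.length = s₀ := by
            rw [List.take_append]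
            simp
          have hgd2 : (s₀ ++ [c]).getD s₀.length 'a' = c := by
            rw [List.getD_eq_getElem?_getD]
            simp
          rw [htk, hgd2]
          simp
        rw [hB]
        simp only [Option.map_some]
        congr 1
        simp only [pvOrd, List.map_append, List.map_cons, List.map_nil]
        congr 2
        rw [pv_toNat_ofNat (c.toNat + 1) (by omega)]
        push_cast
        ring

theorem decode_eq (s : List Char) :
    (pvOrd s).map (fun d => Char.ofNat d.toNat) = s := by
  simp [pvOrd, List.map_map, Function.comp_def]

theorem loop_equiv : ∀ (n : Nat) (s : List Char), pvN pvW (pvOrd s) ≤ n →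
    loopA (pvOrd s) = loopB s := by
  intro n
  induction n with
  | zero =>
      intro s hn
      cases hb : bStep s with
      | none =>
          have hA : addToDigit (pvOrd s) (pvOrd s).length = none := by
            have : (pvOrd s).length = s.length := by simp [pvOrd]
            rw [this, step_equiv, hb]; rfl
          unfold loopA loopB
          rw [hA, hb]
      | some s' =>
          exfalso
          have hA : addToDigit (pvOrd s) (pvOrd s).length = some (pvOrd s') := by
            have : (pvOrd s).length = s.length := by simp [pvOrd]
            rw [this, step_equiv, hb]; rfl
          have := addToDigit_measure _ _ hA
          omega
  | succ n ih =>
      intro s hn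
      cases hb : bStep s with
      | none =>
          have hA : addToDigit (pvOrd s) (pvOrd s).length = none := by
            have : (pvOrd s).length = s.length := by simp [pvOrd]
            rw [this, step_equiv, hb]; rfl
          unfold loopA loopB
          rw [hA, hb]
      | some s' =>
          have hA : addToDigit (pvOrd s) (pvOrd s).length = some (pvOrd s') := by
            have : (pvOrd s).length = s.length := by simp [pvOrd]
            rw [this, step_equiv, hb]; rfl
          have hm := addToDigit_measure _ _ hA
          unfold loopA loopB
          rw [hA, hb]
          simp only []
          rw [decode_eq s', ih s' (by omega)]

-- ===== VERDICT (by name: the statement is the Claim_ definition above) =====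
theorem pass_iterator_spec : Claim_equal_pass_iterator := by
  intro start _
  show pass_iterator start = pass_iterator_alt start
  unfold pass_iterator pass_iterator_alt
  exact loop_equiv (pvN pvW (pvOrd start.toList)) start.toList (le_refl _)
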